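-- pv_equiv track=rewrite | github.com/stevenlee168/stevenserver | app.py | add_rtool_adj
-- ===== SOURCE A (Python) =====
-- def add_rtool_adj(text, tool_adj, tool_og):
--     lines = text.split("\n")
--     new_text = []
--
--     for line in lines:
--         new_text.append(line)
--         if line.strip().startswith("! ---"):  # Kiểm tra comment bắt đầu với ! ---
--             new_text.append(f'    <span class="highlight">{tool_adj}:=Modify_rTCP_Offset({tool_og},0,0,0,0,0,0);</span>')
--             # Nếu bạn muốn giữ HTML tag giống JS:
--             # new_text.append(f'    <span class="highlight">{tool_adj}:=Modify_rTCP_Offset(rtool_adj(processed_text, tool_adj, tool_og)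
--     return "\n".join(new_text)
-- ===== SOURCE B (Python) =====
-- def add_rtool_adj(text, tool_adj, tool_og):
--     # Single character-level pass: a small state machine recognises lines whose
--     # first non-whitespace characters are "! ---" and splices the span in as it
--     # copies the text, with no split()/join() round-trip or line list.
--     span = '    <span class="highlight">' + tool_adj + ':=Modify_rTCP_Offset(' + tool_og + ',0,0,0,0,0,0);</span>'
--     pat = "! ---"
--     out = []
--     s = 0  # 0: in leading whitespace; 1..4: matched s chars of pat; 5: line matches; -1: line cannot match
--     for ch in text:
--         out.append(ch)
--         if ch == '\n':
--             if s == 5: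
--                 out.append(span)
--                 out.append('\n')
--             s = 0
--         elif s == 0:
--             if ch.isspace():
--                 pass
--             elif ch == '!':
--                 s = 1
--             else:
--                 s = -1
--         elif 0 < s < 5:
--             if ch == pat[s]:
--                 s += 1
--             else:
--                 s = -1
--     if s == 5:
--         out.append('\n')
--         out.append(span)
--     return ''.join(out)
-- ===== Notes on version B (the rewrite author's own statement) =====
-- stated objective: alternative
-- what changed: Replaced the split-on-newline / append-to-line-list / join pipeline with a single character-level pass whose small state machine recognises lines whose first non-whitespace characters are '! ---' and splices the span into the output as it copies the text.
import Mathlib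
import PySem

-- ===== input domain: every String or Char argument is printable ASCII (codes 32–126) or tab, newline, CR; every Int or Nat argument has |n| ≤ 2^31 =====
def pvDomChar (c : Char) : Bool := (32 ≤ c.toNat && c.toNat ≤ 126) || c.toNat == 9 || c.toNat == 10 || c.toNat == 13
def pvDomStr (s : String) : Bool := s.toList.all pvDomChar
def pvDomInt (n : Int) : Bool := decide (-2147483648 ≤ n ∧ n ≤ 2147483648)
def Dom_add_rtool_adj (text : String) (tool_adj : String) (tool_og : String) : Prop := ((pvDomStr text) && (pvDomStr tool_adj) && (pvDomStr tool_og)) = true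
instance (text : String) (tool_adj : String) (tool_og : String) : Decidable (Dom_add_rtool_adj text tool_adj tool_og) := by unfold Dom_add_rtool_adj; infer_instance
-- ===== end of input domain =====

-- B replaces A's split/append-loop/join with a single character-level scan that splices the span in
-- as it copies the text (objective: alternative one-pass formulation; equal return value, no mutation).

-- the span text both Pythons build with the same f-string
def pvSpan (tool_adj : String) (tool_og : String) : List Char :=
  "    <span class=\"highlight\">".toList ++ tool_adj.toList ++ ":=Modify_rTCP_Offset(".toList
    ++ tool_og.toList ++ ",0,0,0,0,0,0);</span>".toList

-- ===== PORT A =====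
def add_rtool_adj (text : String) (tool_adj : String) (tool_og : String) : String :=
  let span := pvSpan tool_adj tool_og
  let lines := PySem.Chars.splitOn text.toList ['\n']
  let new_text := lines.foldl (fun acc line =>
    let acc := acc ++ [line]
    if PySem.Chars.startswith (PySem.Chars.strip line) "! ---".toList then acc ++ [span] else acc) []
  String.mk (PySem.Chars.join ['\n'] new_text)

-- ===== PORT B =====
def pvPat : List Char := "! ---".toList

-- B's loop body: state = (characters emitted so far, matcher state s)
def pvStepB (span : List Char) (st : List Char × Int) (ch : Char) : List Char × Int :=
  let out := st.1 ++ [ch]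
  if ch = '\n' then
    (if st.2 = 5 then out ++ span ++ ['\n'] else out, 0)
  else if st.2 = 0 then
    (out, if PySem.Chars.strIsspace [ch] then 0 else if ch = '!' then 1 else -1)
  else if 0 < st.2 ∧ st.2 < 5 then
    (out, if PySem.List.pyGet? pvPat st.2 = some ch then st.2 + 1 else -1)
  else (out, st.2)

def add_rtool_adj_alt (text : String) (tool_adj : String) (tool_og : String) : String :=
  let span := pvSpan tool_adj tool_og
  let r := text.toList.foldl (pvStepB span) ([], 0)
  String.mk (if r.2 = 5 then r.1 ++ ['\n'] ++ span else r.1)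

-- ===== PRECONDITION & SPEC =====
def Spec_add_rtool_adj (text : String) (tool_adj : String) (tool_og : String) (out : String) : Prop := out = add_rtool_adj_alt text tool_adj tool_og
instance (text : String) (tool_adj : String) (tool_og : String) (out : String) : Decidable (Spec_add_rtool_adj text tool_adj tool_og out) := by unfold Spec_add_rtool_adj; infer_instance

-- ===== CLAIM (what is proved, stated in full; the proofs are below) =====
def Claim_equal_add_rtool_adj : Prop := ∀ (text : String) (tool_adj : String) (tool_og : String), Dom_add_rtool_adj text tool_adj tool_og → Spec_add_rtool_adj text tool_adj tool_og (add_rtool_adj text tool_adj tool_og)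

-- ===== LEMMAS AND PROOFS =====

-- B's state transition on a non-newline character
def pvDelta1 (s : Int) (ch : Char) : Int :=
  if s = 0 then (if PySem.Chars.strIsspace [ch] then 0 else if ch = '!' then 1 else -1)
  else if 0 < s ∧ s < 5 then (if PySem.List.pyGet? pvPat s = some ch then s + 1 else -1)
  else s

def pvDelta (s : Int) (l : List Char) : Int := l.foldl pvDelta1 s

-- A's per-line contribution to new_text

-- the two results, as functions of the character list


theorem pvDelta_neg (l : List Char) : pvDelta (-1) l = -1 := by
  induction l with
  | nil => rfl
  | cons c t ih =>
    show pvDelta (pvDelta1 (-1) c) t = -1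
    have h : pvDelta1 (-1) c = -1 := by norm_num [pvDelta1]
    rw [h]; exact ih

theorem pvDelta_five (l : List Char) : pvDelta 5 l = 5 := by
  induction l with
  | nil => rfl
  | cons c t ih =>
    show pvDelta (pvDelta1 5 c) t = 5
    have h : pvDelta1 5 c = 5 := by norm_num [pvDelta1]
    rw [h]; exact ih


theorem pvDelta_k : ∀ (l : List Char) (k : Nat), 1 ≤ k → k ≤ 5 →
    ((pvDelta (k : Int) l = 5) ↔ (pvPat.drop k).isPrefixOf l = true) := by
  intro l
  induction l with
  | nil =>
    intro k h1 h5
    show ((k : Int) = 5) ↔ _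
    interval_cases k <;> simp [pvPat, List.isPrefixOf]
  | cons c t ih =>
    intro k h1 h5
    rcases Nat.lt_or_ge k 5 with h | h
    · have hlt : k < pvPat.length := h
      have hget : PySem.List.pyGet? pvPat (k : Int) = some pvPat[k] :=
        PySem.List.pyGet?_ofNat pvPat k hlt
      have hstep : pvDelta (k : Int) (c :: t) = pvDelta (pvDelta1 (k : Int) c) t := rfl
      rw [hstep, pvDelta1, if_neg (by omega), if_pos (by constructor <;> omega), hget,
        List.drop_eq_getElem_cons hlt]
      by_cases hc : c = pvPat[k]
      · subst hc
        rw [if_pos rfl]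
        have := ih (k + 1) (by omega) (by omega)
        push_cast at this ⊢
        simpa [List.isPrefixOf] using this
      · rw [if_neg (by simpa using fun h => hc (Eq.symm h))]
        simp only [pvDelta_neg]
        constructor
        · intro h; omega
        · intro hpre
          rw [List.isPrefixOf_iff_prefix, List.cons_prefix_cons] at hpre
          exact absurd hpre.1.symm hc
    · have hk : k = 5 := by omega
      subst hk
      simp [pvDelta_five, pvPat, List.isPrefixOf]

theorem pvDelta_zero (l : List Char) :
    (pvDelta 0 l = 5) ↔ pvPat.isPrefixOf (PySem.Chars.lstrip l) = true := by
  induction l with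
  | nil => simp [pvDelta, PySem.Chars.lstrip, pvPat, List.isPrefixOf]
  | cons c t ih =>
    have hstep : pvDelta 0 (c :: t) = pvDelta (pvDelta1 0 c) t := rfl
    by_cases hsp : PySem.Chars.isspace c
    · have h1 : pvDelta1 0 c = 0 := by simp [pvDelta1, PySem.Chars.strIsspace, hsp]
      have h2 : PySem.Chars.lstrip (c :: t) = PySem.Chars.lstrip t := by
        simp [PySem.Chars.lstrip, List.dropWhile_cons, hsp]
      rw [hstep, h1, h2]; exact ih
    · have h2 : PySem.Chars.lstrip (c :: t) = c :: t := by
        simp [PySem.Chars.lstrip, List.dropWhile_cons, hsp]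
      rw [hstep, h2]
      by_cases hc : c = '!'
      · subst hc
        have h1 : pvDelta1 0 '!' = 1 := by
          simp [pvDelta1, PySem.Chars.strIsspace, hsp]
        rw [h1]
        have := pvDelta_k t 1 (by omega) (by omega)
        push_cast at this
        rw [this]
        constructor
        · intro hpre
          rw [List.isPrefixOf_iff_prefix] at hpre ⊢
          rw [show pvPat = '!' :: pvPat.drop 1 from rfl, List.cons_prefix_cons]
          exact ⟨rfl, hpre⟩
        · intro hpre
          rw [List.isPrefixOf_iff_prefix] at hpre ⊢
          rw [show pvPat = '!' :: pvPat.drop 1 from rfl, List.cons_prefix_cons] at hpre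
          exact hpre.2
      · have h1 : pvDelta1 0 c = -1 := by
          simp [pvDelta1, PySem.Chars.strIsspace, hsp, hc]
        rw [h1]
        simp only [pvDelta_neg]
        constructor
        · intro h; omega
        · intro hpre
          rw [List.isPrefixOf_iff_prefix, show pvPat = '!' :: pvPat.drop 1 from rfl,
            List.cons_prefix_cons] at hpre
          exact absurd hpre.1.symm hc

theorem pvPrefix_rstrip (y : List Char) :
    pvPat.isPrefixOf (PySem.Chars.rstrip y) = pvPat.isPrefixOf y := by
  have hsub : (PySem.Chars.rstrip y) <+: y :=
    ⟨(y.reverse.takeWhile PySem.Chars.isspace).reverse, by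
      rw [PySem.Chars.rstrip, ← List.reverse_append, List.takeWhile_append_dropWhile,
        List.reverse_reverse]⟩
  cases hp : pvPat.isPrefixOf y with
  | true =>
    obtain ⟨z, rfl⟩ := List.isPrefixOf_iff_prefix.mp hp
    rw [PySem.Chars.rstrip, List.reverse_append, List.dropWhile_append]
    split
    · have hpr : List.dropWhile PySem.Chars.isspace pvPat.reverse = pvPat.reverse := by decide
      rw [hpr, List.reverse_reverse]
      simp [List.isPrefixOf_iff_prefix]
    · rw [List.reverse_append, List.reverse_reverse]
      simp [List.isPrefixOf_iff_prefix, List.prefix_append]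
  | false =>
    have hy : pvPat.isPrefixOf y = false := hp
    refine Bool.eq_false_iff.mpr (fun hq => ?_)
    exact absurd (List.isPrefixOf_iff_prefix.mpr
      ((List.isPrefixOf_iff_prefix.mp hq).trans hsub)) (by simp [hy])

theorem pvMatch_iff (l : List Char) :
    (pvDelta 0 l = 5) ↔ PySem.Chars.startswith (PySem.Chars.strip l) "! ---".toList = true := by
  rw [pvDelta_zero]
  have h : PySem.Chars.startswith (PySem.Chars.strip l) "! ---".toList
      = pvPat.isPrefixOf (PySem.Chars.rstrip (PySem.Chars.lstrip l)) := rfl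
  rw [h, pvPrefix_rstrip]

theorem pvGo_skip (fuel : Nat) (c : Char) (rest cur : List Char) (acc : List (List Char))
    (h : c ≠ '\n') :
    PySem.Chars.splitOn.go ['\n'] (fuel + 1) (c :: rest) cur acc
      = PySem.Chars.splitOn.go ['\n'] fuel rest (c :: cur) acc := by
  rw [PySem.Chars.splitOn.go]
  simp [List.isPrefixOf, Ne.symm h]

theorem pvGo_nl (fuel : Nat) (rest cur : List Char) (acc : List (List Char)) :
    PySem.Chars.splitOn.go ['\n'] (fuel + 1) ('\n' :: rest) cur acc
      = PySem.Chars.splitOn.go ['\n'] fuel rest [] (cur.reverse :: acc) := by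
  rw [PySem.Chars.splitOn.go]
  simp [List.isPrefixOf]

theorem pvGo_nil (fuel : Nat) (cur : List Char) (acc : List (List Char)) :
    PySem.Chars.splitOn.go ['\n'] fuel [] cur acc = (cur.reverse :: acc).reverse := by
  cases fuel <;> rw [PySem.Chars.splitOn.go] <;> simp

theorem pvGo_acc : ∀ (fuel : Nat) (l cur : List Char) (acc : List (List Char)),
    PySem.Chars.splitOn.go ['\n'] fuel l cur acc
      = acc.reverse ++ PySem.Chars.splitOn.go ['\n'] fuel l cur [] := by
  intro fuel
  induction fuel with
  | zero => intro l cur acc; rw [PySem.Chars.splitOn.go, PySem.Chars.splitOn.go]; simp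
  | succ n ih =>
    intro l cur acc
    cases l with
    | nil => rw [pvGo_nil, pvGo_nil]; simp
    | cons c rest =>
      by_cases hc : c = '\n'
      · subst hc
        rw [pvGo_nl, pvGo_nl, ih rest [] (cur.reverse :: acc), ih rest [] [cur.reverse]]
        simp
      · rw [pvGo_skip n c rest cur acc hc, pvGo_skip n c rest cur [] hc, ih]

theorem pvGo_through : ∀ (l : List Char) (fuel : Nat) (rest cur : List Char)
    (acc : List (List Char)), '\n' ∉ l →
    PySem.Chars.splitOn.go ['\n'] (l.length + fuel) (l ++ rest) cur acc
      = PySem.Chars.splitOn.go ['\n'] fuel rest (l.reverse ++ cur) acc := by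
  intro l
  induction l with
  | nil => intro fuel rest cur acc _; simp
  | cons c t ih =>
    intro fuel rest cur acc h
    have hc : c ≠ '\n' := fun hh => h (by simp [hh])
    have ht : '\n' ∉ t := fun hh => h (by simp [hh])
    rw [show (c :: t).length + fuel = (t.length + fuel) + 1 by simp; omega]
    rw [List.cons_append, pvGo_skip _ c _ cur acc hc, ih fuel rest (c :: cur) acc ht]
    simp

theorem pvGo_through' (l : List Char) (fuel : Nat) (cur : List Char)
    (acc : List (List Char)) (h : '\n' ∉ l) :
    PySem.Chars.splitOn.go ['\n'] (l.length + fuel) l cur acc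
      = PySem.Chars.splitOn.go ['\n'] fuel [] (l.reverse ++ cur) acc := by
  have hh := pvGo_through l fuel [] cur acc h
  simpa using hh

theorem pvSplit_no_nl (cs : List Char) (h : '\n' ∉ cs) :
    PySem.Chars.splitOn cs ['\n'] = [cs] := by
  rw [PySem.Chars.splitOn, pvGo_through' cs 1 [] [] h, pvGo_nil]
  simp

theorem pvSplit_cons (l r : List Char) (h : '\n' ∉ l) :
    PySem.Chars.splitOn (l ++ '\n' :: r) ['\n'] = l :: PySem.Chars.splitOn r ['\n'] := by
  rw [PySem.Chars.splitOn]
  rw [show (l ++ '\n' :: r).length + 1 = l.length + (r.length + 2) by simp; omega]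
  rw [pvGo_through l (r.length + 2) ('\n' :: r) [] [] h, pvGo_nl]
  rw [pvGo_acc, PySem.Chars.splitOn]
  simp

theorem pvGo_ne_nil : ∀ (fuel : Nat) (l cur : List Char) (acc : List (List Char)),
    PySem.Chars.splitOn.go ['\n'] fuel l cur acc ≠ [] := by
  intro fuel
  induction fuel with
  | zero => intro l cur acc; rw [PySem.Chars.splitOn.go]; simp
  | succ n ih =>
    intro l cur acc
    cases l with
    | nil => rw [pvGo_nil]; simp
    | cons c rest =>
      by_cases hc : c = '\n'
      · subst hc; rw [pvGo_nl]; exact ih _ _ _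
      · rw [pvGo_skip n c rest cur acc hc]; exact ih _ _ _

theorem pvSplit_ne_nil (cs : List Char) : PySem.Chars.splitOn cs ['\n'] ≠ [] :=
  pvGo_ne_nil _ _ _ _


theorem pvStepB_out {ch : Char} (span : List Char) (out : List Char) (s : Int) (h : ch ≠ '\n') :
    pvStepB span (out, s) ch = (out ++ [ch], pvDelta1 s ch) := by
  simp only [pvStepB, pvDelta1, h, if_false]
  split_ifs <;> rfl

theorem pvScan_line (span : List Char) : ∀ (l : List Char) (out : List Char) (s : Int), '\n' ∉ l →
    l.foldl (pvStepB span) (out, s) = (out ++ l, pvDelta s l) := by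
  intro l
  induction l with
  | nil => intro out s _; simp [pvDelta]
  | cons c t ih =>
    intro out s h
    have hc : c ≠ '\n' := fun hh => h (by simp [hh])
    have ht : '\n' ∉ t := fun hh => h (by simp [hh])
    rw [List.foldl_cons, pvStepB_out span out s hc, ih (out ++ [c]) (pvDelta1 s c) ht]
    simp [pvDelta]

theorem pvStepB_shift (span : List Char) (out : List Char) (s : Int) (c : Char) :
    pvStepB span (out, s) c
      = (out ++ (pvStepB span ([], s) c).1, (pvStepB span ([], s) c).2) := by
  simp only [pvStepB]
  split_ifs <;> simp

theorem pvShift (span : List Char) : ∀ (r : List Char) (out : List Char) (s : Int),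
    r.foldl (pvStepB span) (out, s) =
      (out ++ (r.foldl (pvStepB span) ([], s)).1, (r.foldl (pvStepB span) ([], s)).2) := by
  intro r
  induction r with
  | nil => intro out s; simp
  | cons c t ih =>
    intro out s
    rw [List.foldl_cons, List.foldl_cons, pvStepB_shift span out s c,
      ih (out ++ (pvStepB span ([], s) c).1) (pvStepB span ([], s) c).2]
    rw [show pvStepB span ([], s) c = ((pvStepB span ([], s) c).1, (pvStepB span ([], s) c).2)
      from rfl, ih (pvStepB span ([], s) c).1 (pvStepB span ([], s) c).2]
    simp

def pvLineA (span : List Char) (line : List Char) : List (List Char) :=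
  line :: (if PySem.Chars.startswith (PySem.Chars.strip line) "! ---".toList then [span] else [])

def pvAres (span : List Char) (cs : List Char) : List Char :=
  PySem.Chars.join ['\n'] ((PySem.Chars.splitOn cs ['\n']).flatMap (pvLineA span))

def pvBres (span : List Char) (cs : List Char) : List Char :=
  let r := cs.foldl (pvStepB span) ([], 0)
  if r.2 = 5 then r.1 ++ ['\n'] ++ span else r.1

theorem pvJoin_single (a : List Char) : PySem.Chars.join ['\n'] [a] = a := by
  simp [PySem.Chars.join, List.intercalate, List.intersperse]

theorem pvJoin_cons (a : List Char) (rest : List (List Char)) (h : rest ≠ []) :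
    PySem.Chars.join ['\n'] (a :: rest) = a ++ '\n' :: PySem.Chars.join ['\n'] rest := by
  cases rest with
  | nil => exact absurd rfl h
  | cons b bs => simp [PySem.Chars.join, List.intercalate, List.intersperse]

theorem pvFlat_ne_nil (span : List Char) (L : List (List Char)) (h : L ≠ []) :
    L.flatMap (pvLineA span) ≠ [] := by
  cases L with
  | nil => exact absurd rfl h
  | cons l L' => simp [pvLineA]

theorem pvBase (span : List Char) (cs : List Char) (h : '\n' ∉ cs) :
    pvAres span cs = pvBres span cs := by
  rw [pvAres, pvSplit_no_nl cs h, pvBres]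
  rw [pvScan_line span cs [] 0 h]
  simp only [List.flatMap_cons, List.flatMap_nil, List.append_nil, List.nil_append]
  by_cases hp : PySem.Chars.startswith (PySem.Chars.strip cs) "! ---".toList = true
  · have h5 : pvDelta 0 cs = 5 := (pvMatch_iff cs).mpr hp
    rw [pvLineA, if_pos hp]
    simp only [h5, if_pos rfl]
    rw [pvJoin_cons cs [span] (by simp), pvJoin_single]
    simp
  · have h5 : ¬ pvDelta 0 cs = 5 := fun hh => hp ((pvMatch_iff cs).mp hh)
    rw [pvLineA, if_neg hp]
    rw [pvJoin_single]
    simp [h5]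

theorem pvMain_aux (span : List Char) : ∀ (n : Nat) (cs : List Char), cs.count '\n' ≤ n →
    pvAres span cs = pvBres span cs := by
  intro n
  induction n with
  | zero =>
    intro cs h
    exact pvBase span cs (by
      intro hm
      have := List.count_pos_iff.mpr hm
      omega)
  | succ n ih =>
    intro cs hcount
    by_cases h : '\n' ∈ cs
    · set p : Char → Bool := fun c => c ≠ '\n' with hp
      have hdne : cs.dropWhile p ≠ [] := by
        rw [Ne, List.dropWhile_eq_nil_iff]
        push_neg
        exact ⟨'\n', h, by simp [hp]⟩
      obtain ⟨c, r, hr⟩ := List.exists_cons_of_ne_nil hdne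
      have hc : c = '\n' := by
        have h1 := List.head_dropWhile_not p hdne
        have h2 : (cs.dropWhile p).head hdne = c := by simp [hr]
        rw [h2] at h1
        simpa [hp] using h1
      subst hc
      set l := cs.takeWhile p with hl
      have hnl : '\n' ∉ l := by
        intro hm
        have := List.mem_takeWhile_imp hm
        simp [hp] at this
      have hcs : l ++ '\n' :: r = cs := by rw [hl, ← hr]; exact List.takeWhile_append_dropWhile
      have hcnt : r.count '\n' ≤ n := by
        have hcc : cs.count '\n' = l.count '\n' + (1 + r.count '\n') := by
          rw [← hcs, List.count_append, List.count_cons]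
          simp [add_comm]
        have hl0 : l.count '\n' = 0 := List.count_eq_zero.mpr hnl
        omega
      have hrec : pvAres span r = pvBres span r := ih r hcnt
      rw [pvAres] at hrec
      have hM : (PySem.Chars.splitOn r ['\n']).flatMap (pvLineA span) ≠ [] :=
        pvFlat_ne_nil span _ (pvSplit_ne_nil r)
      -- A side
      rw [← hcs, pvAres, pvSplit_cons l r hnl, List.flatMap_cons]
      -- B side
      rw [pvBres, List.foldl_append, pvScan_line span l [] 0 hnl, List.foldl_cons]
      rw [show pvStepB span ([] ++ l, pvDelta 0 l) '\n'
          = ((if pvDelta 0 l = 5 then l ++ ['\n'] ++ span ++ ['\n'] else l ++ ['\n']), 0) by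
        simp [pvStepB]]
      rw [pvShift span r _ 0]
      dsimp only
      by_cases hp5 : PySem.Chars.startswith (PySem.Chars.strip l) "! ---".toList = true
      · have h5 : pvDelta 0 l = 5 := (pvMatch_iff l).mpr hp5
        rw [pvLineA, if_pos hp5, List.cons_append, List.cons_append, List.nil_append,
          pvJoin_cons l _ (by simp), pvJoin_cons span _ hM, hrec, if_pos h5, pvBres]
        by_cases hs5 : (r.foldl (pvStepB span) ([], 0)).2 = 5
        · rw [if_pos hs5, if_pos hs5]; simp
        · rw [if_neg hs5, if_neg hs5]; simp
      · have h5 : ¬ pvDelta 0 l = 5 := fun hh => hp5 ((pvMatch_iff l).mp hh)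
        rw [pvLineA, if_neg hp5, List.cons_append, List.nil_append,
          pvJoin_cons l _ hM, hrec, if_neg h5, pvBres]
        by_cases hs5 : (r.foldl (pvStepB span) ([], 0)).2 = 5
        · rw [if_pos hs5, if_pos hs5]; simp
        · rw [if_neg hs5, if_neg hs5]; simp
    · exact pvBase span cs h

theorem pvMain (span : List Char) (cs : List Char) : pvAres span cs = pvBres span cs :=
  pvMain_aux span (cs.count '\n') cs le_rfl

theorem pvFinal (text tool_adj tool_og : String) :
    add_rtool_adj text tool_adj tool_og = add_rtool_adj_alt text tool_adj tool_og := by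
  rw [add_rtool_adj, add_rtool_adj_alt]
  apply congrArg String.mk
  have hfold : (PySem.Chars.splitOn text.toList ['\n']).foldl (fun acc line =>
      let acc := acc ++ [line]
      if PySem.Chars.startswith (PySem.Chars.strip line) "! ---".toList then
        acc ++ [pvSpan tool_adj tool_og] else acc) []
      = (PySem.Chars.splitOn text.toList ['\n']).flatMap (pvLineA (pvSpan tool_adj tool_og)) := by
    have hcong := PySem.List.foldl_congr_mem'
      (l := PySem.Chars.splitOn text.toList ['\n'])
      (init := ([] : List (List Char)))
      (f := fun acc line =>
        let acc := acc ++ [line]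
        if PySem.Chars.startswith (PySem.Chars.strip line) "! ---".toList then
          acc ++ [pvSpan tool_adj tool_og] else acc)
      (g := fun acc line => acc ++ pvLineA (pvSpan tool_adj tool_og) line)
      (by
        intro x _ acc
        simp only [pvLineA]
        split_ifs <;> simp)
    rw [hcong, PySem.List.foldl_append_eq_flatMap]
    simp
  rw [hfold]
  exact pvMain (pvSpan tool_adj tool_og) text.toList

-- ===== VERDICT (by name: the statement is the Claim_ definition above) =====
theorem add_rtool_adj_spec : Claim_equal_add_rtool_adj := by
  intro text tool_adj tool_og _
  unfold Spec_add_rtool_adj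
  exact pvFinal text tool_adj tool_og
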